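-- pv_equiv track=rewrite | github.com/huenique/aliexpress-product-scraper | standalone_store_retry.py | analyze_missing_store_info
-- ===== SOURCE A (Python) =====
-- from typing import Any, Dict, List
--
-- def analyze_missing_store_info(products: List[Dict[str, Any]]) -> Dict[str, int]:
--     """Analyze missing store information in products"""
--     stats = {
--         "total_products": len(products),
--         "missing_store_name": 0,
--         "missing_store_id": 0,
--         "missing_store_url": 0,
--         "missing_any_store_info": 0,
--         "missing_all_store_info": 0,
--     }
--
--     for product in products:
--         store_name = product.get("Store Name")
--         store_id = product.get("Store ID")
--         store_url = product.get("Store URL")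
--
--         missing_name = not store_name or store_name in [None, "null", "", "N/A"]
--         missing_id = not store_id or store_id in [None, "null", "", "N/A"]
--         missing_url = not store_url or store_url in [None, "null", "", "N/A"]
--
--         if missing_name:
--             stats["missing_store_name"] += 1
--         if missing_id:
--             stats["missing_store_id"] += 1
--         if missing_url:
--             stats["missing_store_url"] += 1
--         if missing_name or missing_id or missing_url:
--             stats["missing_any_store_info"] += 1
--         if missing_name and missing_id and missing_url:
--             stats["missing_all_store_info"] += 1
--
--     return stats
-- ===== SOURCE B (Python) =====
-- def analyze_missing_store_info(products):
--     """Analyze missing store information in products"""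
--
--     def missing(v):
--         return not v or v in [None, "null", "", "N/A"]
--
--     # one pass: tally the (missing_name, missing_id, missing_url) pattern of each product
--     patterns = {}
--     for product in products:
--         key = (
--             missing(product.get("Store Name")),
--             missing(product.get("Store ID")),
--             missing(product.get("Store URL")),
--         )
--         patterns[key] = patterns.get(key, 0) + 1
--
--     # derive the five statistics from the pattern frequency table
--     return {
--         "total_products": len(products),
--         "missing_store_name": sum(c for k, c in patterns.items() if k[0]),
--         "missing_store_id": sum(c for k, c in patterns.items() if k[1]),
--         "missing_store_url": sum(c for k, c in patterns.items() if k[2]),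
--         "missing_any_store_info": len(products) - patterns.get((False, False, False), 0),
--         "missing_all_store_info": patterns.get((True, True, True), 0),
--     }
-- ===== Notes on version B (the rewrite author's own statement) =====
-- stated objective: alternative
-- what changed: B replaces A's five in-place dict counters updated by five if-statements per product with a single frequency table keyed by each product's (missing_name, missing_id, missing_url) pattern, deriving all five statistics from the table after the loop.
import Mathlib
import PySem

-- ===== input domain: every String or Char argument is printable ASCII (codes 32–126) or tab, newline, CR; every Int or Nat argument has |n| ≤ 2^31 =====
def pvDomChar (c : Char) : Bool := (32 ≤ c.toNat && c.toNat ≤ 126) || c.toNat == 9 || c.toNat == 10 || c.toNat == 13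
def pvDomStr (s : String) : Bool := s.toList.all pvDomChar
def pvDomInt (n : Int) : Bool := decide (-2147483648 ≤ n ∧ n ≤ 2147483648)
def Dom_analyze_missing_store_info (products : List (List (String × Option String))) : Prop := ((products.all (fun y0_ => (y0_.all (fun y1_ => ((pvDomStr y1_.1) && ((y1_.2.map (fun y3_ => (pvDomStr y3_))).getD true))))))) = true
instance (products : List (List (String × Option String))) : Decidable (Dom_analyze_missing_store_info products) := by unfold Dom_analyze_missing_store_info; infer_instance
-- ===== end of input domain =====

-- B replaces A's five in-place dict counters (five if-updates per product) with one frequency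
-- table keyed by each product's (missing name, id, url) pattern, deriving the five statistics
-- from it after the loop (alternative decomposition; same O(n) cost).


-- ===== PORT A =====
-- `not v or v in [None, "null", "", "N/A"]`  (None and "" are the falsy values here)
def missingA (v : Option String) : Bool :=
  (match v with | none => true | some s => s == "") ||
  (v == none || v == some "null" || v == some "" || v == some "N/A")

def analyze_missing_store_info (products : List (List (String × Option String))) : List (String × Int) :=
  let stats : PySem.Dict String Int := PySem.Dict.mk
    [("total_products", (products.length : Int)),
     ("missing_store_name", 0),
     ("missing_store_id", 0),
     ("missing_store_url", 0),
     ("missing_any_store_info", 0),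
     ("missing_all_store_info", 0)]
  let stats := products.foldl (fun stats product =>
    let store_name := PySem.Dict.getD (PySem.Dict.mk product) "Store Name" none
    let store_id := PySem.Dict.getD (PySem.Dict.mk product) "Store ID" none
    let store_url := PySem.Dict.getD (PySem.Dict.mk product) "Store URL" none
    let missing_name := missingA store_name
    let missing_id := missingA store_id
    let missing_url := missingA store_url
    let stats := if missing_name then PySem.Dict.modify stats "missing_store_name" 0 (· + 1) else stats
    let stats := if missing_id then PySem.Dict.modify stats "missing_store_id" 0 (· + 1) else stats
    let stats := if missing_url then PySem.Dict.modify stats "missing_store_url" 0 (· + 1) else stats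
    let stats := if missing_name || missing_id || missing_url then PySem.Dict.modify stats "missing_any_store_info" 0 (· + 1) else stats
    let stats := if missing_name && missing_id && missing_url then PySem.Dict.modify stats "missing_all_store_info" 0 (· + 1) else stats
    stats) stats
  stats.items

-- ===== PORT B =====
def missingB (v : Option String) : Bool :=
  (match v with | none => true | some s => s == "") ||
  (v == none || v == some "null" || v == some "" || v == some "N/A")

-- the `key` tuple computed in Source B's loop
def keyB (product : List (String × Option String)) : Bool × Bool × Bool :=
  (missingB (PySem.Dict.getD (PySem.Dict.mk product) "Store Name" none),
   missingB (PySem.Dict.getD (PySem.Dict.mk product) "Store ID" none),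
   missingB (PySem.Dict.getD (PySem.Dict.mk product) "Store URL" none))

def analyze_missing_store_info_alt (products : List (List (String × Option String))) : List (String × Int) :=
  let patterns : PySem.Dict (Bool × Bool × Bool) Int :=
    products.foldl (fun d product =>
      let key := keyB product
      d.insert key (d.getD key 0 + 1)) PySem.Dict.empty
  [("total_products", (products.length : Int)),
   ("missing_store_name", ((patterns.items.filter (fun p => p.1.1)).map (·.2)).sum),
   ("missing_store_id", ((patterns.items.filter (fun p => p.1.2.1)).map (·.2)).sum),
   ("missing_store_url", ((patterns.items.filter (fun p => p.1.2.2)).map (·.2)).sum),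
   ("missing_any_store_info", (products.length : Int) - patterns.getD (false, false, false) 0),
   ("missing_all_store_info", patterns.getD (true, true, true) 0)]

-- ===== PRECONDITION & SPEC =====
def Spec_analyze_missing_store_info (products : List (List (String × Option String))) (out : List (String × Int)) : Prop := out = analyze_missing_store_info_alt products
instance (products : List (List (String × Option String))) (out : List (String × Int)) : Decidable (Spec_analyze_missing_store_info products out) := by unfold Spec_analyze_missing_store_info; infer_instance

-- ===== CLAIM (what is proved, stated in full; the proofs are below) =====
def Claim_equal_analyze_missing_store_info : Prop := ∀ (products : List (List (String × Option String))), Dom_analyze_missing_store_info products → Spec_analyze_missing_store_info products (analyze_missing_store_info products)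

-- ===== LEMMAS AND PROOFS =====

-- A's loop body, named for the invariant proof (definitionally the lambda in the port)
def stepA (stats : PySem.Dict String Int) (product : List (String × Option String)) : PySem.Dict String Int :=
    let store_name := PySem.Dict.getD (PySem.Dict.mk product) "Store Name" none
    let store_id := PySem.Dict.getD (PySem.Dict.mk product) "Store ID" none
    let store_url := PySem.Dict.getD (PySem.Dict.mk product) "Store URL" none
    let missing_name := missingA store_name
    let missing_id := missingA store_id
    let missing_url := missingA store_url
    let stats := if missing_name then PySem.Dict.modify stats "missing_store_name" 0 (· + 1) else stats
    let stats := if missing_id then PySem.Dict.modify stats "missing_store_id" 0 (· + 1) else stats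
    let stats := if missing_url then PySem.Dict.modify stats "missing_store_url" 0 (· + 1) else stats
    let stats := if missing_name || missing_id || missing_url then PySem.Dict.modify stats "missing_any_store_info" 0 (· + 1) else stats
    let stats := if missing_name && missing_id && missing_url then PySem.Dict.modify stats "missing_all_store_info" 0 (· + 1) else stats
    stats

def mA (p : List (String × Option String)) : Bool := missingA (PySem.Dict.getD (PySem.Dict.mk p) "Store Name" none)
def mB (p : List (String × Option String)) : Bool := missingA (PySem.Dict.getD (PySem.Dict.mk p) "Store ID" none)
def mC (p : List (String × Option String)) : Bool := missingA (PySem.Dict.getD (PySem.Dict.mk p) "Store URL" none)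

theorem foldA_inv (l : List (List (String × Option String))) : ∀ (t a b c d e : Int),
    l.foldl stepA (PySem.Dict.mk
      [("total_products", t), ("missing_store_name", a), ("missing_store_id", b),
       ("missing_store_url", c), ("missing_any_store_info", d), ("missing_all_store_info", e)]) =
    PySem.Dict.mk
      [("total_products", t),
       ("missing_store_name", a + (l.countP mA : Int)),
       ("missing_store_id", b + (l.countP mB : Int)),
       ("missing_store_url", c + (l.countP mC : Int)),
       ("missing_any_store_info", d + (l.countP (fun p => mA p || mB p || mC p) : Int)),
       ("missing_all_store_info", e + (l.countP (fun p => mA p && mB p && mC p) : Int))] := by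
  induction l with
  | nil => simp
  | cons p l ih =>
    intro t a b c d e
    have hstep : stepA (PySem.Dict.mk
        [("total_products", t), ("missing_store_name", a), ("missing_store_id", b),
         ("missing_store_url", c), ("missing_any_store_info", d), ("missing_all_store_info", e)]) p =
      PySem.Dict.mk
        [("total_products", t),
         ("missing_store_name", a + if mA p then 1 else 0),
         ("missing_store_id", b + if mB p then 1 else 0),
         ("missing_store_url", c + if mC p then 1 else 0),
         ("missing_any_store_info", d + if mA p || mB p || mC p then 1 else 0),
         ("missing_all_store_info", e + if mA p && mB p && mC p then 1 else 0)] := by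
      unfold stepA mA mB mC
      cases hA : missingA (PySem.Dict.getD (PySem.Dict.mk p) "Store Name" none) <;>
      cases hB : missingA (PySem.Dict.getD (PySem.Dict.mk p) "Store ID" none) <;>
      cases hC : missingA (PySem.Dict.getD (PySem.Dict.mk p) "Store URL" none) <;>
      simp only [hA, hB, hC] <;>
      simp [PySem.Dict.modify, PySem.Dict.insert, PySem.Dict.getD, PySem.Dict.get?, PySem.Dict.contains]
    rw [List.foldl_cons, hstep, ih]
    simp only [List.countP_cons, PySem.Dict.mk.injEq, List.cons.injEq, Prod.mk.injEq, and_true, true_and]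
    refine ⟨?_, ?_, ?_, ?_, ?_⟩ <;> (split_ifs <;> push_cast <;> omega)

theorem analyze_missing_store_info_canon (products : List (List (String × Option String))) :
    analyze_missing_store_info products =
      [("total_products", (products.length : Int)),
       ("missing_store_name", (products.countP mA : Int)),
       ("missing_store_id", (products.countP mB : Int)),
       ("missing_store_url", (products.countP mC : Int)),
       ("missing_any_store_info", (products.countP (fun p => mA p || mB p || mC p) : Int)),
       ("missing_all_store_info", (products.countP (fun p => mA p && mB p && mC p) : Int))] := by
  have h : analyze_missing_store_info products =
      (products.foldl stepA (PySem.Dict.mk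
        [("total_products", (products.length : Int)), ("missing_store_name", 0), ("missing_store_id", 0),
         ("missing_store_url", 0), ("missing_any_store_info", 0), ("missing_all_store_info", 0)])).items := rfl
  rw [h, foldA_inv]
  simp [PySem.Dict.items]

theorem keyB_eq (p : List (String × Option String)) : keyB p = (mA p, mB p, mC p) := rfl

-- general counting fact used for B's sums: summing the multiplicities of the distinct
-- keys that satisfy `pred` counts the elements of `flags` satisfying `pred`
theorem sum_count_filter {K : Type} [BEq K] [LawfulBEq K] (pred : K → Bool) (flags : List K) :
    ∀ (S : List K), S.Nodup → (∀ x ∈ flags, x ∈ S) →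
    ((S.filter pred).map (fun k => ((flags.count k : Int)))).sum = (flags.countP pred : Int) := by
  induction flags with
  | nil => intro S _ _; simp
  | cons x flags ih =>
    intro S hnd hsub
    have hx : x ∈ S := hsub x (by simp)
    have hcnt1 : S.count x = 1 := List.count_eq_one_of_mem hnd hx
    have : ((S.filter pred).map (fun k => (((x :: flags).count k : Int)))).sum =
        ((S.filter pred).map (fun k => ((flags.count k : Int)))).sum +
        ((S.filter pred).map (fun k => (if k == x then (1:Int) else 0))).sum := by
      rw [← PySem.List.sum_map_add_int]
      apply congrArg List.sum
      apply List.map_congr_left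
      intro k hk
      simp [List.count_cons]
      by_cases h : x = k
      · subst h; simp
      · simp [h, show ¬k = x from fun hh => h hh.symm]
    rw [this, ih S hnd (fun y hy => hsub y (by simp [hy])), PySem.List.sum_map_ite_one_zero]
    have hcf : (S.filter pred).countP (fun k => k == x) = if pred x then 1 else 0 := by
      have : (S.filter pred).countP (fun k => k == x) = (S.filter pred).count x := by
        simp [List.count]
      rw [this]
      split_ifs with h
      · exact List.count_eq_one_of_mem (hnd.filter _) (List.mem_filter.mpr ⟨hx, h⟩)
      · exact List.count_eq_zero_of_not_mem (fun hmem => h (List.mem_filter.mp hmem).2)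
    rw [hcf]
    simp only [List.countP_cons]
    split_ifs <;> push_cast <;> ring

theorem patterns_eq (products : List (List (String × Option String))) :
    products.foldl (fun d product =>
      (d.insert (keyB product) (d.getD (keyB product) 0 + 1) : PySem.Dict (Bool × Bool × Bool) Int)) PySem.Dict.empty =
    PySem.Dict.counter (products.map keyB) := by
  rw [← PySem.Dict.foldl_insert_getD_add_one_eq_counter, List.foldl_map]

theorem sum_pattern (products : List (List (String × Option String))) (pred : Bool × Bool × Bool → Bool) :
    (((PySem.Dict.counter (products.map keyB)).items.filter (fun p => pred p.1)).map (·.2)).sum =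
    (products.countP (fun p => pred (keyB p)) : Int) := by
  rw [PySem.Dict.items_counter]
  rw [List.filter_map, List.map_map]
  simp only [Function.comp_def]
  have h := sum_count_filter pred (products.map keyB) (PySem.Set.ofList (products.map keyB))
    (PySem.Set.nodup_ofList _) (fun x hx => (PySem.Set.mem_ofList _ _).mpr hx)
  rw [List.countP_map] at h
  simpa [Function.comp_def] using h

theorem count_key_eq (products : List (List (String × Option String))) (k : Bool × Bool × Bool) :
    (products.map keyB).count k = products.countP (fun p => keyB p == k) := by
  rw [List.count_eq_countP, List.countP_map]
  rfl

theorem analyze_missing_store_info_alt_canon (products : List (List (String × Option String))) :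
    analyze_missing_store_info_alt products =
      [("total_products", (products.length : Int)),
       ("missing_store_name", (products.countP mA : Int)),
       ("missing_store_id", (products.countP mB : Int)),
       ("missing_store_url", (products.countP mC : Int)),
       ("missing_any_store_info", (products.countP (fun p => mA p || mB p || mC p) : Int)),
       ("missing_all_store_info", (products.countP (fun p => mA p && mB p && mC p) : Int))] := by
  unfold analyze_missing_store_info_alt
  simp only [patterns_eq, sum_pattern products (fun k => k.1), sum_pattern products (fun k => k.2.1),
    sum_pattern products (fun k => k.2.2), PySem.Dict.getD_counter, count_key_eq]
  have e1 : List.countP (fun p => (keyB p).1) products = List.countP mA products := by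
    apply List.countP_congr; intro p _; simp [keyB_eq, mA]
  have e2 : List.countP (fun p => (keyB p).2.1) products = List.countP mB products := by
    apply List.countP_congr; intro p _; simp [keyB_eq, mB]
  have e3 : List.countP (fun p => (keyB p).2.2) products = List.countP mC products := by
    apply List.countP_congr; intro p _; simp [keyB_eq, mC]
  have e5 : List.countP (fun p => keyB p == (true, true, true)) products =
      List.countP (fun p => mA p && mB p && mC p) products := by
    apply List.countP_congr; intro p _
    rw [keyB_eq]
    cases hA : mA p <;> cases hB : mB p <;> cases hC : mC p <;> simp [hA, hB, hC]
  have e4 : (products.length : Int) - (List.countP (fun p => keyB p == (false, false, false)) products : Int) =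
      (List.countP (fun p => mA p || mB p || mC p) products : Int) := by
    have hsplit := List.length_eq_countP_add_countP (fun p => mA p || mB p || mC p) (l := products)
    have hnot : List.countP (fun p => keyB p == (false, false, false)) products =
        List.countP (fun a => decide ¬((fun p => mA p || mB p || mC p) a) = true) products := by
      apply List.countP_congr; intro p _
      rw [keyB_eq]
      cases hA : mA p <;> cases hB : mB p <;> cases hC : mC p <;> simp [hA, hB, hC]
    rw [hnot, hsplit]
    push_cast
    ring
  rw [e1, e2, e3, e4, e5]

-- ===== VERDICT (by name: the statement is the Claim_ definition above) =====
theorem analyze_missing_store_info_spec : Claim_equal_analyze_missing_store_info := by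
  intro products _
  unfold Spec_analyze_missing_store_info
  rw [analyze_missing_store_info_canon, analyze_missing_store_info_alt_canon]
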